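-- pv_equiv track=rewrite | github.com/LFW25/Algorithms-COSC262- | L2_nlognComplexity.py | dumbo_func
-- ===== SOURCE A (Python) =====
-- def dumbo_func(data, index = 0):
--     """Takes a list of numbers and does weird stuff with it"""
--     if index > len(data) - 1:
--         return 0
--     else:
--         if (data[index] // 100) % 3 != 0:
--             return 1 + dumbo_func(data, index + 1)
--         else:
--             return dumbo_func(data, index + 1)
-- ===== SOURCE B (Python) =====
-- def dumbo_func(data, index=0):
--     """Takes a list of numbers and does weird stuff with it"""
--     count = 0
--     while index <= len(data) - 1:
--         if (data[index] // 100) % 3 != 0: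
--             count += 1
--         index += 1
--     return count
-- ===== Notes on version B (the rewrite author's own statement) =====
-- stated objective: simpler
-- what changed: Replaces the non-tail recursion (one stack frame per element) with a single iterative while-loop carrying a count accumulator, indexing data[index] directly so nonzero/negative starting indices behave identically.
-- outside the precondition, e.g. on dumbo_func([100], -2): A raises IndexError, B raises IndexError
import Mathlib
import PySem

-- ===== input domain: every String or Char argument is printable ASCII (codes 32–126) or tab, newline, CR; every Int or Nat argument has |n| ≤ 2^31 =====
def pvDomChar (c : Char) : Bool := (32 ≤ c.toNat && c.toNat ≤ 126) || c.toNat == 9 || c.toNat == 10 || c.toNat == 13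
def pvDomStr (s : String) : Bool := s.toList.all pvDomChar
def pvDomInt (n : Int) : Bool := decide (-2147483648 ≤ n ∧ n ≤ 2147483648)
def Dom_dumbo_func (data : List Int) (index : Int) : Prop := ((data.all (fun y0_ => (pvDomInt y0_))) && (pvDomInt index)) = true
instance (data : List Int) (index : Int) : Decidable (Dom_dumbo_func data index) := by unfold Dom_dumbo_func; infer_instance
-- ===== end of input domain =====

-- B replaces A's non-tail recursion by one iterative while-loop with a count accumulator (simpler, O(1) space).

-- ===== PORT A =====
def dumbo_func (data : List Int) (index : Int) : Int :=
  if index > (data.length : Int) - 1 then 0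
  else
    match PySem.List.pyGet? data index with
    | none => 0   -- Python raises IndexError here; excluded by Pre_
    | some x =>
      if PySem.Int.mod (PySem.Int.floordiv x 100) 3 ≠ 0 then 1 + dumbo_func data (index + 1)
      else dumbo_func data (index + 1)
termination_by ((data.length : Int) - index).toNat
decreasing_by all_goals omega

-- ===== PORT B =====
-- the while-loop of Source B: state = (index, count)
def dumbo_alt_loop (data : List Int) (index : Int) (count : Int) : Int :=
  if index ≤ (data.length : Int) - 1 then
    let count' :=
      match PySem.List.pyGet? data index with
      | none => count   -- Python raises IndexError here; excluded by Pre_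
      | some x => if PySem.Int.mod (PySem.Int.floordiv x 100) 3 ≠ 0 then count + 1 else count
    dumbo_alt_loop data (index + 1) count'
  else count
termination_by ((data.length : Int) - index).toNat
decreasing_by all_goals omega

def dumbo_func_alt (data : List Int) (index : Int) : Int :=
  dumbo_alt_loop data index 0

-- ===== PRECONDITION & SPEC =====
-- Pre_ excludes exactly the inputs where Python A raises IndexError: index < -len(data)
-- (negative-index wraparound past the front of the list).
def Pre_dumbo_func (data : List Int) (index : Int) : Prop := -(data.length : Int) ≤ index
instance (data : List Int) (index : Int) : Decidable (Pre_dumbo_func data index) := by unfold Pre_dumbo_func; infer_instance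
def pvWitness_dumbo_func : List Int × Int := ([150, 300, -42], 0)

def Spec_dumbo_func (data : List Int) (index : Int) (out : Int) : Prop := out = dumbo_func_alt data index
instance (data : List Int) (index : Int) (out : Int) : Decidable (Spec_dumbo_func data index out) := by unfold Spec_dumbo_func; infer_instance

-- ===== CLAIM (what is proved, stated in full; the proofs are below) =====
def Claim_equal_dumbo_func : Prop := ∀ (data : List Int) (index : Int), Dom_dumbo_func data index → Pre_dumbo_func data index → Spec_dumbo_func data index (dumbo_func data index)

-- ===== LEMMAS AND PROOFS =====
-- Loop invariant: the accumulator loop computes count + (A's recursive count).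
theorem dumbo_alt_loop_eq (data : List Int) :
    ∀ (n : Nat) (index count : Int), ((data.length : Int) - index).toNat ≤ n →
      -(data.length : Int) ≤ index →
      dumbo_alt_loop data index count = count + dumbo_func data index := by
  intro n
  induction n with
  | zero =>
    intro index count h _
    have hgt : (data.length : Int) - 1 < index := by omega
    rw [dumbo_alt_loop, dumbo_func, if_neg (by omega : ¬ index ≤ (data.length : Int) - 1), if_pos hgt]
    ring
  | succ n ih =>
    intro index count h hpre
    rw [dumbo_alt_loop, dumbo_func]
    by_cases hle : index ≤ (data.length : Int) - 1
    · rw [if_pos hle, if_neg (by omega : ¬ (data.length : Int) - 1 < index)]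
      have hin : PySem.Raise.InRange data.length index := by
        unfold PySem.Raise.InRange; omega
      obtain ⟨x, hget⟩ : ∃ x, PySem.List.pyGet? data index = some x := by
        cases hx : PySem.List.pyGet? data index with
        | none => exact absurd (((PySem.List.pyGet?_eq_none_iff data index).mp hx)) (by simpa using hin)
        | some x => exact ⟨x, rfl⟩
      simp only [hget]
      have ihr := fun c => ih (index + 1) c (by omega) (by omega)
      split_ifs with hc
      · rw [ihr (count + 1)]; ring
      · exact ihr count
    · rw [if_neg hle, if_pos (by omega : (data.length : Int) - 1 < index)]
      ring

-- ===== VERDICT (by name: the statement is the Claim_ definition above) =====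
theorem dumbo_func_spec : Claim_equal_dumbo_func := by
  intro data index _ _
  unfold Spec_dumbo_func dumbo_func_alt
  rw [dumbo_alt_loop_eq data ((data.length : Int) - index).toNat index 0 (le_refl _) (by assumption)]
  ring
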